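-- pv_equiv track=rewrite | github.com/simulatedScience/Twisty_Puzzle_Program | tests/state compression tests/state_compression_v1.py | compress_state
-- ===== SOURCE A (Python) =====
-- def compress_state(state, n_colors):
--     bin_digits = n_colors.bit_length()
--     compact_state = [1]
--     bit_number = 1
--     for s in state:
--         if bit_number >= 31:
--             bit_number = 1
--             compact_state.append(1)
--         compact_state[-1] <<= bin_digits
--         compact_state[-1] |= s
--         bit_number += bin_digits
--     return compact_state
-- ===== SOURCE B (Python) =====
-- def compress_state(state, n_colors):
--     d = n_colors.bit_length()
--     st = list(state)
--     if d == 0: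
--         groups = [st]
--     else:
--         c = -(-30 // d)  # ceil(30/d) = group size A's bit counter produces
--         groups = [st[i:i + c] for i in range(0, len(st), c)] or [[]]
--     out = []
--     for g in groups:
--         acc = 1
--         for s in g:
--             acc = (acc << d) | s
--         out.append(acc)
--     return out
-- ===== Notes on version B (the rewrite author's own statement) =====
-- stated objective: alternative
-- what changed: B replaces A's running bit counter and in-place mutation of the list's last element by computing the group size ceil(30/bit_length) up front, slicing the state into fixed-size groups, and packing each group independently.
import Mathlib
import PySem

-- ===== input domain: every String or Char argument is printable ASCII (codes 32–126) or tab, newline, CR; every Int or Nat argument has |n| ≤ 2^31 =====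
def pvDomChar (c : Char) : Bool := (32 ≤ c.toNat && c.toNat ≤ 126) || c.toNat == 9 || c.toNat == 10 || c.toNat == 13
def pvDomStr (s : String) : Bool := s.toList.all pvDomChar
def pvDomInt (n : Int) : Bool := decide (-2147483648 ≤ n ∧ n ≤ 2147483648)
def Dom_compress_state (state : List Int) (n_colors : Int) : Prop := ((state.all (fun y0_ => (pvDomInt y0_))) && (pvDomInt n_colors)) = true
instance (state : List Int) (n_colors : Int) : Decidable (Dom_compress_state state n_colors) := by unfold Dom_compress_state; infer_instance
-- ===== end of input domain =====

-- B replaces A's running bit counter and in-place last-element mutation by computing the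
-- group size ceil(30/d) up front, slicing the state into groups and packing each group
-- independently (objective: alternative decomposition, same O(n) cost).

-- ===== PORT A =====

-- compact_state[-1] <<= …; compact_state[-1] |= …  : rewrite the last element of the list
def pvSetLast (f : Int → Int) : List Int → List Int
  | [] => []
  | [x] => [f x]
  | x :: y :: xs => x :: pvSetLast f (y :: xs)

def compress_state (state : List Int) (n_colors : Int) : List Int :=
  let bin_digits := PySem.Int.bitLength n_colors
  let r := state.foldl (fun (acc : List Int × Int) s =>
      let acc := if acc.2 ≥ 31 then (acc.1 ++ [(1 : Int)], (1 : Int)) else acc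
      (pvSetLast (fun x => PySem.Int.bor (x <<< bin_digits) s) acc.1,
       acc.2 + (bin_digits : Int))) ([1], 1)
  r.1

-- ===== PORT B =====

-- [st[i:i+c] for i in range(0, len(st), c)] : consecutive slices of size c = cm1 + 1
def pvChunks (cm1 : Nat) (xs : List Int) : List (List Int) :=
  if h : xs = [] then [] else xs.take (cm1 + 1) :: pvChunks cm1 (xs.drop (cm1 + 1))
termination_by xs.length
decreasing_by cases xs with
  | nil => exact absurd rfl h
  | cons a t => simp

def compress_state_alt (state : List Int) (n_colors : Int) : List Int :=
  let d := PySem.Int.bitLength n_colors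
  let groups :=
    if d = 0 then [state]
    else
      -- c = -(-30 // d) = ceil(30/d), written with Nat division
      let c := (30 + d - 1) / d
      let gs := pvChunks (c - 1) state
      if gs = [] then [([] : List Int)] else gs
  groups.map (fun g => g.foldl (fun a s => PySem.Int.bor (a <<< d) s) 1)

-- ===== PRECONDITION & SPEC =====
def Spec_compress_state (state : List Int) (n_colors : Int) (out : List Int) : Prop := out = compress_state_alt state n_colors
instance (state : List Int) (n_colors : Int) (out : List Int) : Decidable (Spec_compress_state state n_colors out) := by unfold Spec_compress_state; infer_instance

-- ===== CLAIM (what is proved, stated in full; the proofs are below) =====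
def Claim_equal_compress_state : Prop := ∀ (state : List Int) (n_colors : Int), Dom_compress_state state n_colors → Spec_compress_state state n_colors (compress_state state n_colors)

-- ===== LEMMAS AND PROOFS =====

lemma pvSetLast_append (f : Int → Int) (done : List Int) (cur : Int) :
    pvSetLast f (done ++ [cur]) = done ++ [f cur] := by
  induction done with
  | nil => rfl
  | cons a t ih => cases t <;> simp_all [pvSetLast]

lemma pvChunks_nil (cm1 : Nat) : pvChunks cm1 [] = [] := by
  rw [pvChunks]; simp

lemma pvChunks_cons (cm1 : Nat) (x : Int) (xs : List Int) :
    pvChunks cm1 (x :: xs) = (x :: xs.take cm1) :: pvChunks cm1 (xs.drop cm1) := by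
  rw [pvChunks]; simp

-- reset condition of A's loop: 31 ≤ 1 + k*d  ↔  c ≤ k,  for c = ceil(30/d)
lemma reset_iff (d c k : Nat) (_hd : 0 < d) (hc1 : 30 ≤ c * d) (hc2 : c * d < 30 + d) :
    ((31 : Int) ≤ 1 + (k : Int) * (d : Int)) ↔ c ≤ k := by
  have key : (30 ≤ k * d) ↔ c ≤ k := by
    constructor
    · intro h
      by_contra hk
      have h2 : k + 1 ≤ c := by omega
      have h3 := Nat.mul_le_mul_right d h2
      have hs : (k + 1) * d = k * d + d := by ring
      omega
    · intro h
      have := Nat.mul_le_mul_right d h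
      omega
  constructor
  · intro h
    have h30 : (30 : Int) ≤ (k : Int) * (d : Int) := by linarith
    exact key.1 (by exact_mod_cast h30)
  · intro h
    have h30 : (30 : Int) ≤ (k : Int) * (d : Int) := by exact_mod_cast key.2 h
    linarith

-- the step function of A's loop, for a fixed digit width d
def pvStep (d : Nat) (acc : List Int × Int) (s : Int) : List Int × Int :=
  let acc := if acc.2 ≥ 31 then (acc.1 ++ [(1 : Int)], (1 : Int)) else acc
  (pvSetLast (fun x => PySem.Int.bor (x <<< d) s) acc.1, acc.2 + (d : Int))

def pvPackFrom (d : Nat) (cur : Int) (g : List Int) : Int :=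
  g.foldl (fun a s => PySem.Int.bor (a <<< d) s) cur

lemma compress_state_eq (state : List Int) (n_colors : Int) :
    compress_state state n_colors
      = (List.foldl (pvStep (PySem.Int.bitLength n_colors)) ([1], 1) state).1 := rfl

-- loop invariant: mid-group, k elements already packed into cur (0 ≤ k ≤ c)
lemma loop_eq (d c : Nat) (hd : 0 < d) (hc1 : 30 ≤ c * d) (hc2 : c * d < 30 + d) :
    ∀ (xs done : List Int) (cur : Int) (k : Nat), k ≤ c →
    (List.foldl (pvStep d) (done ++ [cur], 1 + (k : Int) * (d : Int)) xs).1
      = if k = c then done ++ cur :: (pvChunks (c - 1) xs).map (pvPackFrom d 1)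
        else done ++ pvPackFrom d cur (xs.take (c - k))
               :: (pvChunks (c - 1) (xs.drop (c - k))).map (pvPackFrom d 1) := by
  have hc0 : 0 < c := by
    rcases Nat.eq_zero_or_pos c with h | h
    · subst h; omega
    · exact h
  intro xs
  induction xs with
  | nil =>
    intro done cur k hk
    simp [pvChunks_nil, pvPackFrom]
  | cons s xs ih =>
    intro done cur k hk
    by_cases hkc : k = c
    · -- reset fires, start a fresh group with this element
      subst hkc
      have hge : ((done ++ [cur], 1 + (k : Int) * (d : Int)).2 ≥ 31) := by
        simpa using (reset_iff d k k hd hc1 hc2).2 le_rfl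
      rw [List.foldl_cons]
      have hstep : pvStep d (done ++ [cur], 1 + (k : Int) * (d : Int)) s
          = ((done ++ [cur]) ++ [PySem.Int.bor ((1 : Int) <<< d) s],
             1 + ((1 : Nat) : Int) * (d : Int)) := by
        simp only [pvStep, hge, if_pos, pvSetLast_append, Prod.mk.injEq]
        refine ⟨by trivial, by push_cast; ring⟩
      rw [hstep, ih (done ++ [cur]) _ 1 hc0]
      rw [if_pos rfl, pvChunks_cons]
      by_cases h1 : 1 = k
      · rw [if_pos h1]
        subst h1
        simp [pvPackFrom]
      · rw [if_neg h1]
        simp [pvPackFrom]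
    · -- still inside the current group
      have hlt : k < c := lt_of_le_of_ne hk hkc
      have hge : ¬ ((done ++ [cur], 1 + (k : Int) * (d : Int)).2 ≥ 31) := by
        intro h
        exact absurd ((reset_iff d c k hd hc1 hc2).1 h) (by omega)
      rw [List.foldl_cons]
      have hstep : pvStep d (done ++ [cur], 1 + (k : Int) * (d : Int)) s
          = (done ++ [PySem.Int.bor (cur <<< d) s],
             1 + (((k + 1) : Nat) : Int) * (d : Int)) := by
        simp only [pvStep, hge, if_false, pvSetLast_append, Prod.mk.injEq]
        refine ⟨by trivial, by push_cast; ring⟩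
      rw [hstep, ih done _ (k + 1) hlt]
      rw [if_neg hkc]
      by_cases hk1 : k + 1 = c
      · rw [if_pos hk1]
        have hck : c - k = 1 := by omega
        rw [hck]
        simp [pvPackFrom]
      · rw [if_neg hk1]
        have hck : c - k = (c - (k + 1)) + 1 := by omega
        rw [hck]
        simp [pvPackFrom]

-- d = 0: the bit counter never grows, so A packs everything into one group
lemma loop_zero :
    ∀ (xs done : List Int) (cur : Int),
    (List.foldl (pvStep 0) (done ++ [cur], 1) xs).1 = done ++ [pvPackFrom 0 cur xs] := by
  intro xs
  induction xs with
  | nil => intro done cur; simp [pvPackFrom]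
  | cons s xs ih =>
    intro done cur
    rw [List.foldl_cons]
    have hstep : pvStep 0 (done ++ [cur], 1) s
        = (pvSetLast (fun x => PySem.Int.bor (x <<< (0 : Nat)) s) (done ++ [cur]), 1) := by
      norm_num [pvStep]
    rw [hstep, pvSetLast_append, ih]
    simp only [pvPackFrom, List.foldl_cons]

-- ===== VERDICT (by name: the statement is the Claim_ definition above) =====
theorem compress_state_spec : Claim_equal_compress_state := by
  intro state n_colors _
  unfold Spec_compress_state
  rw [compress_state_eq]
  show _ = compress_state_alt state n_colors
  simp only [compress_state_alt]
  by_cases hd : PySem.Int.bitLength n_colors = 0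
  · rw [hd, if_pos rfl]
    have h0 := loop_zero state [] 1
    simp only [List.nil_append] at h0
    rw [h0]
    simp [pvPackFrom]
  · rw [if_neg hd]
    set d := PySem.Int.bitLength n_colors with hdname
    have hd0 : 0 < d := Nat.pos_of_ne_zero hd
    generalize hcq : (30 + d - 1) / d = c
    have hdm : d * c + (30 + d - 1) % d = 30 + d - 1 := by
      rw [← hcq]; exact Nat.div_add_mod _ _
    have hmlt : (30 + d - 1) % d < d := Nat.mod_lt _ hd0
    have hcomm : c * d = d * c := Nat.mul_comm c d
    have hc1 : 30 ≤ c * d := by omega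
    have hc2 : c * d < 30 + d := by omega
    have hcpos : 0 < c := by
      rcases Nat.eq_zero_or_pos c with h | h
      · exfalso; rw [h] at hc1; simp at hc1
      · exact h
    have hmain := loop_eq d c hd0 hc1 hc2 state [] 1 0 (Nat.zero_le c)
    have hne : ¬ ((0 : Nat) = c) := by omega
    rw [if_neg hne] at hmain
    simp only [List.nil_append, Nat.cast_zero, zero_mul, add_zero, Nat.sub_zero] at hmain
    obtain ⟨m, rfl⟩ : ∃ m, c = m + 1 := ⟨c - 1, by omega⟩
    rw [hmain]
    have hm : m + 1 - 1 = m := by omega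
    rw [hm]
    cases state with
    | nil => simp [pvChunks_nil, pvPackFrom]
    | cons x xs =>
      have hchunks : pvChunks m (x :: xs) ≠ [] := by
        rw [pvChunks_cons]; simp
      rw [if_neg hchunks, pvChunks_cons]
      simp [pvPackFrom, List.take_succ_cons, List.drop_succ_cons]
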